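-- pv_equiv track=rewrite | github.com/thorbenvh8/CarND-Vehicle-Detection | vehicle-detection.py | get_heat_windows_rec
-- ===== SOURCE A (Python) =====
-- def get_heat_windows_rec(windows_pixels, x, y):
--     x_resultx = x
--     y_resultx = y
--     x_resulty = x
--     y_resulty = y
--     if windows_pixels[x+1][y+1] == 1:
--         x_resultx, y_resultx = get_heat_windows_rec(windows_pixels, x+1, y+1)
--     elif windows_pixels[x+2][y+2] == 1:
--         x_resultx, y_resultx = get_heat_windows_rec(windows_pixels, x+2, y+2)
--     elif windows_pixels[x+3][y+3] == 1:
--         x_resultx, y_resultx = get_heat_windows_rec(windows_pixels, x+3, y+3)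
--     #if windows_pixels[x][y+1] == 1:
--     #    x_resulty, y_resulty = get_windows_rec(windows_pixels, x, y+1)
--     return x_resultx, y_resultx
-- ===== SOURCE B (Python) =====
-- def get_heat_windows_rec(windows_pixels, x, y):
--     d = y - x
--     c = x
--     i = x + 1
--     while i <= c + 3:
--         if windows_pixels[i][i + d] == 1:
--             c = i
--         i += 1
--     return c, c + d
-- ===== Notes on version B (the rewrite author's own statement) =====
-- stated objective: simpler
-- what changed: A's three-way recursion (jump to the first of the next three diagonal cells equal to 1) is replaced by a single while loop advancing a cursor i one step at a time and remembering the last 1-cell seen as an anchor c, stopping when i passes c+3; it performs the same cell reads in the same order.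
import Mathlib
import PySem

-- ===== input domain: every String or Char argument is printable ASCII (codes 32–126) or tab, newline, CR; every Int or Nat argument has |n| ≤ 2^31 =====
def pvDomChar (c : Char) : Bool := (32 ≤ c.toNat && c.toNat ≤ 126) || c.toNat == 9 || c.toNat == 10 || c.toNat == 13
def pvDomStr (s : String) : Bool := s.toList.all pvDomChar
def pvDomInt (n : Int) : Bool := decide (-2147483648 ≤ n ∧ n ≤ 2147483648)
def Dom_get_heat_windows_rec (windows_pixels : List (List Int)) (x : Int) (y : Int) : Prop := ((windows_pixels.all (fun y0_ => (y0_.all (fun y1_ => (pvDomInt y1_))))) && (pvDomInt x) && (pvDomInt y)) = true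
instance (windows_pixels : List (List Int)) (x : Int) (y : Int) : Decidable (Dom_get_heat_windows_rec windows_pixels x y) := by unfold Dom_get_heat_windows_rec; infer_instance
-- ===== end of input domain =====

-- B replaces A's three-way recursive jumps by a single advancing cursor with a last-hit anchor (simpler; return value only — neither version mutates its arguments).

-- wp[i][j] with Python's negative-index wraparound at both levels; none = IndexError
def pvRead2 (wp : List (List Int)) (i j : Int) : Option Int :=
  (PySem.List.pyGet? wp i).bind (fun r => PySem.List.pyGet? r j)

-- needed by both ports' termination proofs
theorem pvRead2_bounds {wp : List (List Int)} {i j v : Int} (h : pvRead2 wp i j = some v) :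
    -(wp.length : Int) ≤ i ∧ i < (wp.length : Int) := by
  by_contra hc
  unfold pvRead2 at h
  rw [(PySem.List.pyGet?_eq_none_iff wp i).2 (by unfold PySem.Raise.InRange; omega)] at h
  simp at h

-- ===== PORT A =====
def get_heat_windows_rec (windows_pixels : List (List Int)) (x : Int) (y : Int) : Int × Int :=
  match h1 : pvRead2 windows_pixels (x+1) (y+1) with
  | none => (x, y)          -- Python raises IndexError here; excluded by Pre_
  | some v1 =>
    if v1 = 1 then get_heat_windows_rec windows_pixels (x+1) (y+1)
    else
      match h2 : pvRead2 windows_pixels (x+2) (y+2) with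
      | none => (x, y)      -- IndexError; excluded by Pre_
      | some v2 =>
        if v2 = 1 then get_heat_windows_rec windows_pixels (x+2) (y+2)
        else
          match h3 : pvRead2 windows_pixels (x+3) (y+3) with
          | none => (x, y)  -- IndexError; excluded by Pre_
          | some v3 =>
            if v3 = 1 then get_heat_windows_rec windows_pixels (x+3) (y+3)
            else (x, y)
termination_by ((windows_pixels.length : Int) - x).toNat
decreasing_by
  · have := (pvRead2_bounds h1).2; omega
  · have := (pvRead2_bounds h2).2; omega
  · have := (pvRead2_bounds h3).2; omega

-- ===== PORT B =====
-- the while loop of Source B: cursor i scans forward, c is the last 1-cell hit (the anchor)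
def pvChase (wp : List (List Int)) (d : Int) (c i : Int) : Int × Int :=
  if i ≤ c + 3 then
    match h : pvRead2 wp i (i + d) with
    | none => (c, c + d)    -- Python raises IndexError here; excluded by Pre_
    | some v => pvChase wp d (if v = 1 then i else c) (i + 1)
  else (c, c + d)
termination_by ((wp.length : Int) + 3 - i).toNat
decreasing_by
  have := (pvRead2_bounds h).2; omega

def get_heat_windows_rec_alt (windows_pixels : List (List Int)) (x : Int) (y : Int) : Int × Int :=
  pvChase windows_pixels (y - x) x (x + 1)

-- ===== PRECONDITION & SPEC =====
-- the up-to-three short-circuited reads made from position x on diagonal d all succeed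
def pvSafe (wp : List (List Int)) (d : Int) (x : Int) : Bool :=
  match pvRead2 wp (x+1) (x+1+d) with
  | none => false
  | some v1 =>
    v1 == 1 ||
      match pvRead2 wp (x+2) (x+2+d) with
      | none => false
      | some v2 =>
        v2 == 1 || (pvRead2 wp (x+3) (x+3+d)).isSome

-- the cell at row i on diagonal d holds a 1
def pvHit (wp : List (List Int)) (d : Int) (i : Int) : Bool :=
  pvRead2 wp i (i + d) == some 1

-- from row p the chain can step: one of the next three diagonal cells holds a 1
def pvStep (wp : List (List Int)) (d : Int) (p : Int) : Bool :=
  pvHit wp d (p+1) || pvHit wp d (p+2) || pvHit wp d (p+3)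

-- the 1-cell at row j is reached by the chain from x: from the start and from every
-- intermediate diagonal 1-cell a further step (gap ≤ 3) exists
-- the reach condition at one row p: if p is the start or an intermediate 1-cell, a step exists
def pvReachAt (wp : List (List Int)) (d : Int) (x j p : Int) : Bool :=
  !(p == x || (decide (x < p) && decide (p < j) && pvHit wp d p)) || pvStep wp d p

def pvReach (wp : List (List Int)) (d : Int) (x j : Int) : Bool :=
  (List.range (2 * wp.length + 2)).all
    (fun k => pvReachAt wp d x j ((k : Int) - wp.length - 1))

-- Pre_ excludes exactly the inputs on which A raises IndexError: it fails precisely when the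
-- start, or a diagonal 1-cell the chain actually reaches from it (linked back to x by 1-cells
-- with gaps ≤ 3), has one of its up-to-three short-circuited diagonal reads out of range.
def Pre_get_heat_windows_rec (windows_pixels : List (List Int)) (x : Int) (y : Int) : Prop :=
  pvSafe windows_pixels (y - x) x = true ∧
  ∀ k ∈ List.range (2 * windows_pixels.length),
    x < (k : Int) - windows_pixels.length →
    pvHit windows_pixels (y - x) ((k : Int) - windows_pixels.length) = true →
    pvReach windows_pixels (y - x) x ((k : Int) - windows_pixels.length) = true →
    pvSafe windows_pixels (y - x) ((k : Int) - windows_pixels.length) = true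
instance (windows_pixels : List (List Int)) (x : Int) (y : Int) : Decidable (Pre_get_heat_windows_rec windows_pixels x y) := by unfold Pre_get_heat_windows_rec; infer_instance

def pvWitness_get_heat_windows_rec : List (List Int) × Int × Int :=
  ([[0,1,0,0,0],[0,0,0,0,0],[0,0,0,0,0],[0,0,0,0,0],[0,0,0,0,0]], 0, 0)

def Spec_get_heat_windows_rec (windows_pixels : List (List Int)) (x : Int) (y : Int) (out : Int × Int) : Prop := out = get_heat_windows_rec_alt windows_pixels x y
instance (windows_pixels : List (List Int)) (x : Int) (y : Int) (out : Int × Int) : Decidable (Spec_get_heat_windows_rec windows_pixels x y out) := by unfold Spec_get_heat_windows_rec; infer_instance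

-- ===== CLAIM (what is proved, stated in full; the proofs are below) =====
def Claim_equal_get_heat_windows_rec : Prop := ∀ (windows_pixels : List (List Int)) (x : Int) (y : Int), Dom_get_heat_windows_rec windows_pixels x y → Pre_get_heat_windows_rec windows_pixels x y → Spec_get_heat_windows_rec windows_pixels x y (get_heat_windows_rec windows_pixels x y)

-- ===== LEMMAS AND PROOFS =====

-- pvReach with the row index quantified over Int (proof-side form)
def pvReachI (wp : List (List Int)) (d : Int) (x j : Int) : Prop :=
  ∀ p : Int, (p = x ∨ (x < p ∧ p < j ∧ pvHit wp d p = true)) → pvStep wp d p = true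

theorem pvReachAt_iff (wp : List (List Int)) (d x j p : Int) :
    pvReachAt wp d x j p = true ↔
      ((p = x ∨ (x < p ∧ p < j ∧ pvHit wp d p = true)) → pvStep wp d p = true) := by
  simp only [pvReachAt, Bool.or_eq_true, Bool.not_eq_true', Bool.or_eq_false_iff,
    Bool.and_eq_false_iff, beq_eq_false_iff_ne, ne_eq, decide_eq_false_iff_not, not_lt]
  constructor
  · rintro (⟨hne, hcase⟩ | hstep) hyp
    · rcases hyp with rfl | ⟨ha, hb, hc⟩
      · exact absurd rfl hne
      · rcases hcase with (h | h) | h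
        · omega
        · omega
        · rw [hc] at h; exact absurd h (by simp)
    · exact hstep
  · intro himp
    by_cases hstep : pvStep wp d p = true
    · exact Or.inr hstep
    · left
      constructor
      · intro hpx
        exact hstep (himp (Or.inl hpx))
      · by_cases hhit : pvHit wp d p = true
        · left
          by_contra hc
          push Not at hc
          exact hstep (himp (Or.inr ⟨by omega, by omega, hhit⟩))
        · right
          simpa using hhit

theorem pvReachI_to_reach {wp : List (List Int)} {d x j : Int}
    (h : pvReachI wp d x j) : pvReach wp d x j = true := by
  unfold pvReach
  rw [List.all_eq_true]
  intro k _
  exact (pvReachAt_iff wp d x j _).2 (fun hk => h _ hk)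

theorem pvHit_true {wp : List (List Int)} {d i v : Int}
    (h : pvRead2 wp i (i + d) = some v) (hv : v = 1) : pvHit wp d i = true := by
  simp [pvHit, h, hv]

theorem pvHit_false {wp : List (List Int)} {d i v : Int}
    (h : pvRead2 wp i (i + d) = some v) (hv : ¬ v = 1) : pvHit wp d i = false := by
  simp [pvHit, h, hv]

theorem pvKey (m : Nat) : ∀ (wp : List (List Int)) (d x : Int),
    ((wp.length : Int) - x).toNat ≤ m →
    pvSafe wp d x = true →
    (∀ j : Int, x < j → pvHit wp d j = true → pvReachI wp d x j → pvSafe wp d j = true) →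
    get_heat_windows_rec wp x (x + d) = pvChase wp d x (x + 1) := by
  induction m with
  | zero =>
    intro wp d x hm hs _
    exfalso
    unfold pvSafe at hs
    cases h1 : pvRead2 wp (x+1) (x+1+d) with
    | none => rw [h1] at hs; simp at hs
    | some v1 => have := (pvRead2_bounds h1).2; omega
  | succ m ih =>
    intro wp d x hm hs hH
    have key1 : pvRead2 wp (x+1) ((x+d)+1) = pvRead2 wp (x+1) (x+1+d) := by ring_nf
    have key2 : pvRead2 wp (x+2) ((x+d)+2) = pvRead2 wp (x+2) (x+2+d) := by ring_nf
    have key3 : pvRead2 wp (x+3) ((x+d)+3) = pvRead2 wp (x+3) (x+3+d) := by ring_nf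
    have keyh1 : pvRead2 wp (x+1) ((x+1)+d) = pvRead2 wp (x+1) (x+1+d) := by ring_nf
    have keyh2 : pvRead2 wp (x+2) ((x+2)+d) = pvRead2 wp (x+2) (x+2+d) := by ring_nf
    have keyh3 : pvRead2 wp (x+3) ((x+3)+d) = pvRead2 wp (x+3) (x+3+d) := by ring_nf
    unfold pvSafe at hs
    cases h1 : pvRead2 wp (x+1) (x+1+d) with
    | none => rw [h1] at hs; simp at hs
    | some v1 =>
      rw [h1] at hs
      have hx1 : x + 1 < (wp.length : Int) := (pvRead2_bounds h1).2
      by_cases hv1 : v1 = 1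
      · -- jump to x+1
        have hit1 : pvHit wp d (x+1) = true := pvHit_true (by rw [keyh1]; exact h1) hv1
        have hstepx : pvStep wp d x = true := by
          unfold pvStep; rw [hit1]; simp
        have hsafe1 : pvSafe wp d (x+1) = true := by
          apply hH (x+1) (by omega) hit1
          intro p hp
          rcases hp with rfl | ⟨hlt, hlt2, _⟩
          · exact hstepx
          · omega
        have hH1 : ∀ j : Int, x+1 < j → pvHit wp d j = true → pvReachI wp d (x+1) j → pvSafe wp d j = true := by
          intro j hj hitj hrj
          apply hH j (by omega) hitj
          intro p hp
          rcases hp with rfl | ⟨hlt, hltj, hitp⟩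
          · exact hstepx
          · rcases lt_trichotomy p (x+1) with h | h | h
            · omega
            · exact hrj p (Or.inl h)
            · exact hrj p (Or.inr ⟨h, hltj, hitp⟩)
        have hA : get_heat_windows_rec wp x (x + d) = get_heat_windows_rec wp (x+1) ((x+d)+1) := by
          rw [get_heat_windows_rec, key1, h1]; simp [hv1]
        have hB : pvChase wp d x (x+1) = pvChase wp d (x+1) (x+1+1) := by
          rw [pvChase, if_pos (by omega : x + 1 ≤ x + 3), keyh1, h1]; simp [hv1]
        rw [hA, hB, show (x+d)+1 = (x+1)+d from by ring]
        exact ih wp d (x+1) (by omega) hsafe1 hH1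
      ·
        have hmiss1 : pvHit wp d (x+1) = false := pvHit_false (by rw [keyh1]; exact h1) hv1
        cases h2 : pvRead2 wp (x+2) (x+2+d) with
        | none => rw [h2] at hs; simp [hv1] at hs
        | some v2 =>
          rw [h2] at hs
          have hx2 : x + 2 < (wp.length : Int) := (pvRead2_bounds h2).2
          by_cases hv2 : v2 = 1
          · -- jump to x+2
            have hit2 : pvHit wp d (x+2) = true := pvHit_true (by rw [keyh2]; exact h2) hv2
            have hstepx : pvStep wp d x = true := by
              unfold pvStep; rw [hit2]; simp
            have hsafe2 : pvSafe wp d (x+2) = true := by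
              apply hH (x+2) (by omega) hit2
              intro p hp
              rcases hp with rfl | ⟨hlt, hlt2, hitp⟩
              · exact hstepx
              · have : p = x + 1 := by omega
                rw [this, hmiss1] at hitp; exact absurd hitp (by simp)
            have hH2 : ∀ j : Int, x+2 < j → pvHit wp d j = true → pvReachI wp d (x+2) j → pvSafe wp d j = true := by
              intro j hj hitj hrj
              apply hH j (by omega) hitj
              intro p hp
              rcases hp with rfl | ⟨hlt, hltj, hitp⟩
              · exact hstepx
              · rcases lt_trichotomy p (x+2) with h | h | h
                · have : p = x + 1 := by omega
                  rw [this, hmiss1] at hitp; exact absurd hitp (by simp)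
                · exact hrj p (Or.inl h)
                · exact hrj p (Or.inr ⟨h, hltj, hitp⟩)
            have hA : get_heat_windows_rec wp x (x + d) = get_heat_windows_rec wp (x+2) ((x+d)+2) := by
              rw [get_heat_windows_rec, key1, h1]
              simp only [hv1, if_false]
              rw [key2, h2]; simp [hv2]
            have hB : pvChase wp d x (x+1) = pvChase wp d (x+2) (x+2+1) := by
              rw [pvChase, if_pos (by omega : x + 1 ≤ x + 3), keyh1, h1]
              simp only [hv1, if_false]
              rw [show x+1+1 = x+2 from by ring, pvChase,
                  if_pos (by omega : x + 2 ≤ x + 3), keyh2, h2]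
              simp [hv2]
            rw [hA, hB, show (x+d)+2 = (x+2)+d from by ring]
            exact ih wp d (x+2) (by omega) hsafe2 hH2
          · have hmiss2 : pvHit wp d (x+2) = false := pvHit_false (by rw [keyh2]; exact h2) hv2
            cases h3 : pvRead2 wp (x+3) (x+3+d) with
            | none => rw [h3] at hs; simp [hv1, hv2] at hs
            | some v3 =>
              have hx3 : x + 3 < (wp.length : Int) := (pvRead2_bounds h3).2
              have hB2 : pvChase wp d x (x+1) = pvChase wp d (if v3 = 1 then x+3 else x) (x+3+1) := by
                rw [pvChase, if_pos (by omega : x + 1 ≤ x + 3), keyh1, h1]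
                simp only [hv1, if_false]
                rw [show x+1+1 = x+2 from by ring, pvChase,
                    if_pos (by omega : x + 2 ≤ x + 3), keyh2, h2]
                simp only [hv2, if_false]
                rw [show x+2+1 = x+3 from by ring, pvChase,
                    if_pos (by omega : x + 3 ≤ x + 3), keyh3, h3]
              by_cases hv3 : v3 = 1
              · have hit3 : pvHit wp d (x+3) = true := pvHit_true (by rw [keyh3]; exact h3) hv3
                have hstepx : pvStep wp d x = true := by
                  unfold pvStep; rw [hit3]; simp
                have hsafe3 : pvSafe wp d (x+3) = true := by
                  apply hH (x+3) (by omega) hit3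
                  intro p hp
                  rcases hp with rfl | ⟨hlt, hlt2, hitp⟩
                  · exact hstepx
                  · have : p = x + 1 ∨ p = x + 2 := by omega
                    rcases this with rfl' | rfl'
                    · rw [rfl', hmiss1] at hitp; exact absurd hitp (by simp)
                    · rw [rfl', hmiss2] at hitp; exact absurd hitp (by simp)
                have hH3 : ∀ j : Int, x+3 < j → pvHit wp d j = true → pvReachI wp d (x+3) j → pvSafe wp d j = true := by
                  intro j hj hitj hrj
                  apply hH j (by omega) hitj
                  intro p hp
                  rcases hp with rfl | ⟨hlt, hltj, hitp⟩
                  · exact hstepx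
                  · rcases lt_trichotomy p (x+3) with h | h | h
                    · have : p = x + 1 ∨ p = x + 2 := by omega
                      rcases this with rfl' | rfl'
                      · rw [rfl', hmiss1] at hitp; exact absurd hitp (by simp)
                      · rw [rfl', hmiss2] at hitp; exact absurd hitp (by simp)
                    · exact hrj p (Or.inl h)
                    · exact hrj p (Or.inr ⟨h, hltj, hitp⟩)
                have hA : get_heat_windows_rec wp x (x + d) = get_heat_windows_rec wp (x+3) ((x+d)+3) := by
                  rw [get_heat_windows_rec, key1, h1]
                  simp only [hv1, if_false]
                  rw [key2, h2]
                  simp only [hv2, if_false]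
                  rw [key3, h3]; simp [hv3]
                rw [hA, hB2, if_pos hv3, show (x+d)+3 = (x+3)+d from by ring]
                exact ih wp d (x+3) (by omega) hsafe3 hH3
              · have hA : get_heat_windows_rec wp x (x + d) = (x, x + d) := by
                  rw [get_heat_windows_rec, key1, h1]
                  simp only [hv1, if_false]
                  rw [key2, h2]
                  simp only [hv2, if_false]
                  rw [key3, h3]; simp [hv3]
                have hB3 : pvChase wp d x (x+3+1) = (x, x + d) := by
                  rw [pvChase, if_neg (by omega : ¬ (x + 3 + 1 ≤ x + 3))]
                rw [hA, hB2, if_neg hv3, hB3]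

-- ===== VERDICT (by name: the statement is the Claim_ definition above) =====
theorem get_heat_windows_rec_spec : Claim_equal_get_heat_windows_rec := by
  intro wp x y _ hpre
  unfold Spec_get_heat_windows_rec get_heat_windows_rec_alt
  have hH : ∀ j : Int, x < j → pvHit wp (y - x) j = true → pvReachI wp (y - x) x j → pvSafe wp (y - x) j = true := by
    intro j hxj hitj hrj
    have hr : pvRead2 wp j (j + (y - x)) = some 1 := by
      have := hitj; unfold pvHit at this; simpa using this
    have hb := pvRead2_bounds hr
    have e : ((j + (wp.length : Int)).toNat : Int) - (wp.length : Int) = j := by omega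
    have h2 := hpre.2 (j + (wp.length : Int)).toNat (by rw [List.mem_range]; omega)
    rw [e] at h2
    exact h2 hxj hitj (pvReachI_to_reach hrj)
  have h := pvKey ((wp.length : Int) - x).toNat wp (y - x) x (le_refl _) hpre.1 hH
  rw [show x + (y - x) = y from by ring] at h
  exact h
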